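-- pv_equiv track=rewrite | github.com/molly5617/NTU-CV | HW8/HW8.py | box_filter3
-- ===== SOURCE A (Python) =====
-- def expan(arr):
--     m=len(arr)
--     n=len(arr[0])
--     res=[[0]*(n+2) for i in range(m+2)]
--     for i in range(1,m+1):
--         res[i][0]=arr[i-1][0]
--         res[i][n+1]=arr[i-1][n-1]
--     for j in range(1,n+1):
--         res[0][j]=arr[0][j-1]
--         res[m+1][j]=arr[m-1][j-1]
--     res[0][0]=arr[0][0]
--     res[0][n+1]=arr[0][n-1]
--     res[m+1][0]=arr[m-1][0]
--     res[m+1][n+1]=arr[m-1][n-1]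
--     for i in range(1,m+1):
--         for j in range(1,n+1):
--             res[i][j]=arr[i-1][j-1]
--     return res
--
-- def box_filter3(lena):
--     m=len(lena)
--     n=len(lena[0])
--     lena=expan(lena)
--     res=[[0]*n for i in range(m)]
--     for i in range(m):
--         tmp=lena[i][0]+lena[i+1][0]+lena[i+2][0]+lena[i][1]+lena[i+1][1]+lena[i+2][1]+lena[i][2]+lena[i+1][2]+lena[i+2][2]
--         res[i][0]=tmp//9
--         for j in range(1,n):
--             tmp-=lena[i][j-1]+lena[i+1][j-1]+lena[i+2][j-1]
--             tmp+=lena[i][j+2]+lena[i+1][j+2]+lena[i+2][j+2]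
--             res[i][j]=tmp//9
--     return res
-- ===== SOURCE B (Python) =====
-- def box_filter3(lena):
--     m = len(lena)
--     n = len(lena[0])
--
--     def cl(x, hi):
--         return 0 if x < 0 else (hi if x > hi else x)
--
--     return [[sum(lena[cl(i + di, m - 1)][cl(j + dj, n - 1)]
--                  for di in (-1, 0, 1) for dj in (-1, 0, 1)) // 9
--              for j in range(n)]
--             for i in range(m)]
-- ===== Notes on version B (the rewrite author's own statement) =====
-- stated objective: simpler
-- what changed: B drops the padded copy and the incremental sliding sum entirely: each output pixel is the floor-mean of the nine neighbours read directly from the input with indices clamped to the image borders.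
import Mathlib
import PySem

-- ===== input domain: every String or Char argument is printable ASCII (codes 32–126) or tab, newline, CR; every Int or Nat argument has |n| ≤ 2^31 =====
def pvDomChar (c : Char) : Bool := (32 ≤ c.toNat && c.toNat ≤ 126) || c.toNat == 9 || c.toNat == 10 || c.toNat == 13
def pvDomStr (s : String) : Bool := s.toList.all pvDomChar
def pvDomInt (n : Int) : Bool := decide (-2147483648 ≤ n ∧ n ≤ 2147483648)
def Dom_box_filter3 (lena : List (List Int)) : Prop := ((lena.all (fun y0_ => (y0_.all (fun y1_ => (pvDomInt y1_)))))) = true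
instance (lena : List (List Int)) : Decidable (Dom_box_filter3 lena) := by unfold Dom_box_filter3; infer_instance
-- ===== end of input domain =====

-- B drops A's padded copy and incremental sliding window sum: each output pixel is computed
-- directly as the floor-mean of its nine border-clamped neighbours (objective: simpler).

-- ===== PORT A =====
-- g[i][j] read / write; exact for the nonnegative in-range indices A uses under Pre_.
def pvGd2 (g : List (List Int)) (i j : Nat) : Int := (g.getD i []).getD j 0
def pvSt2 (g : List (List Int)) (i j : Nat) (v : Int) : List (List Int) :=
  g.set i ((g.getD i []).set j v)

-- bodies of expan's three loops (i / j are the Python loop variables, already shifted by +1)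
def expStep1 (arr : List (List Int)) (n : Nat) (r : List (List Int)) (k : Nat) : List (List Int) :=
  let i := k + 1
  pvSt2 (pvSt2 r i 0 (pvGd2 arr (i-1) 0)) i (n+1) (pvGd2 arr (i-1) (n-1))

def expStep2 (arr : List (List Int)) (m : Nat) (r : List (List Int)) (k : Nat) : List (List Int) :=
  let j := k + 1
  pvSt2 (pvSt2 r 0 j (pvGd2 arr 0 (j-1))) (m+1) j (pvGd2 arr (m-1) (j-1))

def expStep3 (arr : List (List Int)) (r : List (List Int)) (i j : Nat) : List (List Int) :=
  pvSt2 r i j (pvGd2 arr (i-1) (j-1))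

def expan (arr : List (List Int)) : List (List Int) :=
  let m := arr.length
  let n := (arr.headD []).length
  let res := List.replicate (m+2) (List.replicate (n+2) (0 : Int))
  let res := (List.range m).foldl (expStep1 arr n) res
  let res := (List.range n).foldl (expStep2 arr m) res
  let res := pvSt2 res 0 0 (pvGd2 arr 0 0)
  let res := pvSt2 res 0 (n+1) (pvGd2 arr 0 (n-1))
  let res := pvSt2 res (m+1) 0 (pvGd2 arr (m-1) 0)
  let res := pvSt2 res (m+1) (n+1) (pvGd2 arr (m-1) (n-1))
  (List.range m).foldl (fun r k =>
    (List.range n).foldl (fun r' k' => expStep3 arr r' (k+1) (k'+1)) r) res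

-- body of the inner sliding-window loop of box_filter3 (state = (tmp, res))
def bfStep (L : List (List Int)) (i : Nat) (s : Int × List (List Int)) (k : Nat) :
    Int × List (List Int) :=
  let j := k + 1
  let t := s.1 - (pvGd2 L i (j-1) + pvGd2 L (i+1) (j-1) + pvGd2 L (i+2) (j-1))
  let t := t + (pvGd2 L i (j+2) + pvGd2 L (i+1) (j+2) + pvGd2 L (i+2) (j+2))
  (t, pvSt2 s.2 i j (PySem.Int.floordiv t 9))

-- body of the outer row loop of box_filter3 (computes tmp, writes res[i][0], runs the inner loop)
def bfRow (L : List (List Int)) (n : Nat) (r : List (List Int)) (i : Nat) : List (List Int) :=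
  let tmp := pvGd2 L i 0 + pvGd2 L (i+1) 0 + pvGd2 L (i+2) 0
           + pvGd2 L i 1 + pvGd2 L (i+1) 1 + pvGd2 L (i+2) 1
           + pvGd2 L i 2 + pvGd2 L (i+1) 2 + pvGd2 L (i+2) 2
  let r := pvSt2 r i 0 (PySem.Int.floordiv tmp 9)
  ((List.range (n-1)).foldl (bfStep L i) (tmp, r)).2

def box_filter3 (lena : List (List Int)) : List (List Int) :=
  let m := lena.length
  let n := (lena.headD []).length
  let L := expan lena
  let res := List.replicate m (List.replicate n (0 : Int))
  (List.range m).foldl (bfRow L n) res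

-- ===== PORT B =====
-- cl(x, hi) of Source B
def pvClamp (x hi : Int) : Int := if x < 0 then 0 else if x > hi then hi else x

-- lena[cl(i, m-1)][cl(j, n-1)] of Source B (indices are always in range after clamping)
def pvAt (lena : List (List Int)) (m n : Nat) (i j : Int) : Int :=
  PySem.List.pyGetD (PySem.List.pyGetD lena (pvClamp i ((m : Int) - 1)) []) (pvClamp j ((n : Int) - 1)) 0

def box_filter3_alt (lena : List (List Int)) : List (List Int) :=
  let m := lena.length
  let n := (lena.headD []).length
  (List.range m).map (fun (i : Nat) =>
    (List.range n).map (fun (j : Nat) =>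
      PySem.Int.floordiv
        (([(-1 : Int), 0, 1].map (fun di =>
            ([(-1 : Int), 0, 1].map (fun dj =>
              pvAt lena m n ((i : Int) + di) ((j : Int) + dj))).sum)).sum) 9))

-- ===== PRECONDITION & SPEC =====
-- Pre_ excludes exactly the inputs on which A raises IndexError: the empty list, an empty first
-- row, and rows shorter than the first row (A reads columns 0..n-1 of every row).
def Pre_box_filter3 (lena : List (List Int)) : Prop :=
  lena ≠ [] ∧ 0 < (lena.headD []).length ∧
    ∀ row ∈ lena, (lena.headD []).length ≤ row.length
instance (lena : List (List Int)) : Decidable (Pre_box_filter3 lena) := by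
  unfold Pre_box_filter3; infer_instance
def pvWitness_box_filter3 : List (List Int) := [[1, 2], [3, 4]]

def Spec_box_filter3 (lena : List (List Int)) (out : List (List Int)) : Prop := out = box_filter3_alt lena
instance (lena : List (List Int)) (out : List (List Int)) : Decidable (Spec_box_filter3 lena out) := by unfold Spec_box_filter3; infer_instance

-- ===== CLAIM (what is proved, stated in full; the proofs are below) =====
def Claim_equal_box_filter3 : Prop := ∀ (lena : List (List Int)), Dom_box_filter3 lena → Pre_box_filter3 lena → Spec_box_filter3 lena (box_filter3 lena)

-- ===== LEMMAS AND PROOFS =====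

-- value of the padded image expan lena at (a, b) (Nat subtraction clamps at 0)
def pvE (lena : List (List Int)) (a b : Nat) : Int :=
  pvGd2 lena (min (a-1) (lena.length - 1)) (min (b-1) ((lena.headD []).length - 1))

-- the 3×3 window sum A's tmp holds for output column j (columns j..j+2 of L, A's order)
def pvW (L : List (List Int)) (i j : Nat) : Int :=
  pvGd2 L i j + pvGd2 L (i+1) j + pvGd2 L (i+2) j
  + pvGd2 L i (j+1) + pvGd2 L (i+1) (j+1) + pvGd2 L (i+2) (j+1)
  + pvGd2 L i (j+2) + pvGd2 L (i+1) (j+2) + pvGd2 L (i+2) (j+2)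

def pvShape (M N : Nat) (g : List (List Int)) : Prop :=
  g.length = M ∧ ∀ a, a < M → (g.getD a []).length = N

theorem pvGd2_congr (g : List (List Int)) {x y x' y' : Nat} (hx : x = x') (hy : y = y') :
    pvGd2 g x y = pvGd2 g x' y' := by rw [hx, hy]

theorem pvFd_congr (L : List (List Int)) {i b i' b' : Nat} (h1 : i = i') (h2 : b = b') :
    PySem.Int.floordiv (pvW L i b) 9 = PySem.Int.floordiv (pvW L i' b') 9 := by rw [h1, h2]

theorem getD_set (l : List Int) (i j : Nat) (v d : Int) :
    (l.set i v).getD j d = if j = i ∧ i < l.length then v else l.getD j d := by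
  simp [List.getD, List.getElem?_set]
  split_ifs with h1 h2 h3 h4 <;> simp_all

theorem getD_set' (l : List (List Int)) (i j : Nat) (v d : List Int) :
    (l.set i v).getD j d = if j = i ∧ i < l.length then v else l.getD j d := by
  simp [List.getD, List.getElem?_set]
  split_ifs with h1 h2 h3 h4 <;> simp_all

theorem getD_replicate (M N a : Nat) :
    ((List.replicate M (List.replicate N (0:Int))).getD a []).length = if a < M then N else 0 := by
  rw [List.getD_eq_getElem?_getD]
  rcases Nat.lt_or_ge a M with h | h
  · simp [List.getElem?_replicate, h]
  · rw [List.getElem?_eq_none (by simpa using h)]; simp; omega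

theorem pvShape_replicate (M N : Nat) : pvShape M N (List.replicate M (List.replicate N (0:Int))) := by
  refine ⟨by simp, fun a ha => by rw [getD_replicate]; simp [ha]⟩

theorem pvGd2_replicate (M N a b : Nat) : pvGd2 (List.replicate M (List.replicate N (0:Int))) a b = 0 := by
  simp only [pvGd2, List.getD_eq_getElem?_getD, List.getElem?_replicate]
  split <;> simp

theorem pvShape_pvSt2 {M N : Nat} {g : List (List Int)} (h : pvShape M N g)
    (i j : Nat) (v : Int) : pvShape M N (pvSt2 g i j v) := by
  obtain ⟨h1, h2⟩ := h
  refine ⟨by simp [pvSt2, h1], ?_⟩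
  intro a ha
  rw [pvSt2, getD_set']
  split_ifs with hc
  · rw [List.length_set]; exact h2 i (hc.1 ▸ ha)
  · exact h2 a ha

theorem pvGd2_pvSt2 (g : List (List Int)) (i j : Nat) (v : Int)
    (hi : i < g.length) (hj : j < (g.getD i []).length) (a b : Nat) :
    pvGd2 (pvSt2 g i j v) a b = if a = i ∧ b = j then v else pvGd2 g a b := by
  unfold pvGd2 pvSt2
  rw [getD_set']
  split_ifs with h1 h2 h2
  · rw [getD_set, if_pos ⟨h2.2, hj⟩]
  · rw [getD_set, if_neg (fun hc => h2 ⟨h1.1, hc.1⟩), h1.1]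
  · omega
  · rfl

theorem loop1_char (lena : List (List Int)) (M N : Nat) (hM : M = lena.length)
    (hN : N = (lena.headD []).length) (hn : 0 < N) :
    ∀ t, t ≤ M → ∀ g, pvShape (M+2) (N+2) g →
      pvShape (M+2) (N+2) ((List.range t).foldl (expStep1 lena N) g) ∧
      ∀ a b, pvGd2 ((List.range t).foldl (expStep1 lena N) g) a b =
        if 1 ≤ a ∧ a ≤ t ∧ b = 0 then pvGd2 lena (a-1) 0
        else if 1 ≤ a ∧ a ≤ t ∧ b = N+1 then pvGd2 lena (a-1) (N-1)
        else pvGd2 g a b := by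
  intro t
  induction t with
  | zero =>
    intro _ g hg
    refine ⟨hg, fun a b => ?_⟩
    simp only [List.range_zero, List.foldl_nil]
    split_ifs <;> first | omega | rfl
  | succ t ih =>
    intro ht g hg
    obtain ⟨⟨hlen, hrow⟩, hcell⟩ := ih (by omega) g hg
    rw [List.range_succ, List.foldl_append, List.foldl_cons, List.foldl_nil]
    set G := (List.range t).foldl (expStep1 lena N) g with hG
    have hsh1 : pvShape (M+2) (N+2) (expStep1 lena N G t) := by
      unfold expStep1
      exact pvShape_pvSt2 (pvShape_pvSt2 ⟨hlen, hrow⟩ _ _ _) _ _ _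
    refine ⟨hsh1, fun a b => ?_⟩
    show pvGd2 (expStep1 lena N G t) a b = _
    unfold expStep1
    have hG1 : pvShape (M+2) (N+2) (pvSt2 G (t+1) 0 (pvGd2 lena (t+1-1) 0)) :=
      pvShape_pvSt2 ⟨hlen, hrow⟩ _ _ _
    rw [pvGd2_pvSt2 _ _ _ _ (by rw [hG1.1]; omega) (by rw [hG1.2 (t+1) (by omega)]; omega)]
    rw [pvGd2_pvSt2 _ _ _ _ (by rw [hlen]; omega) (by rw [hrow (t+1) (by omega)]; omega)]
    rw [hcell a b]
    split_ifs <;> first | rfl | omega | (congr 2 <;> omega) | (congr 1 <;> omega)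

theorem loop2_char (lena : List (List Int)) (M N : Nat) (hM : M = lena.length)
    (hN : N = (lena.headD []).length) (hn : 0 < N) :
    ∀ t, t ≤ N → ∀ g, pvShape (M+2) (N+2) g →
      pvShape (M+2) (N+2) ((List.range t).foldl (expStep2 lena M) g) ∧
      ∀ a b, pvGd2 ((List.range t).foldl (expStep2 lena M) g) a b =
        if a = 0 ∧ 1 ≤ b ∧ b ≤ t then pvGd2 lena 0 (b-1)
        else if a = M+1 ∧ 1 ≤ b ∧ b ≤ t then pvGd2 lena (M-1) (b-1)
        else pvGd2 g a b := by
  intro t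
  induction t with
  | zero =>
    intro _ g hg
    refine ⟨hg, fun a b => ?_⟩
    simp only [List.range_zero, List.foldl_nil]
    split_ifs <;> first | omega | rfl
  | succ t ih =>
    intro ht g hg
    obtain ⟨⟨hlen, hrow⟩, hcell⟩ := ih (by omega) g hg
    rw [List.range_succ, List.foldl_append, List.foldl_cons, List.foldl_nil]
    set G := (List.range t).foldl (expStep2 lena M) g with hG
    have hsh1 : pvShape (M+2) (N+2) (expStep2 lena M G t) := by
      unfold expStep2
      exact pvShape_pvSt2 (pvShape_pvSt2 ⟨hlen, hrow⟩ _ _ _) _ _ _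
    refine ⟨hsh1, fun a b => ?_⟩
    show pvGd2 (expStep2 lena M G t) a b = _
    unfold expStep2
    have hG1 : pvShape (M+2) (N+2) (pvSt2 G 0 (t+1) (pvGd2 lena 0 (t+1-1))) :=
      pvShape_pvSt2 ⟨hlen, hrow⟩ _ _ _
    rw [pvGd2_pvSt2 _ _ _ _ (by rw [hG1.1]; omega) (by rw [hG1.2 (M+1) (by omega)]; omega)]
    rw [pvGd2_pvSt2 _ _ _ _ (by rw [hlen]; omega) (by rw [hrow 0 (by omega)]; omega)]
    rw [hcell a b]
    split_ifs <;> first | rfl | omega | (congr 2 <;> omega) | (congr 1 <;> omega)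

theorem loop3_inner_char (lena : List (List Int)) (M N : Nat) (hM : M = lena.length)
    (hN : N = (lena.headD []).length) (i : Nat) (hi : 1 ≤ i) (hi2 : i ≤ M) :
    ∀ t, t ≤ N → ∀ g, pvShape (M+2) (N+2) g →
      pvShape (M+2) (N+2) ((List.range t).foldl (fun r' k' => expStep3 lena r' i (k'+1)) g) ∧
      ∀ a b, pvGd2 ((List.range t).foldl (fun r' k' => expStep3 lena r' i (k'+1)) g) a b =
        if a = i ∧ 1 ≤ b ∧ b ≤ t then pvGd2 lena (i-1) (b-1)
        else pvGd2 g a b := by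
  intro t
  induction t with
  | zero =>
    intro _ g hg
    refine ⟨hg, fun a b => ?_⟩
    simp only [List.range_zero, List.foldl_nil]
    split_ifs <;> first | omega | rfl
  | succ t ih =>
    intro ht g hg
    obtain ⟨⟨hlen, hrow⟩, hcell⟩ := ih (by omega) g hg
    rw [List.range_succ, List.foldl_append, List.foldl_cons, List.foldl_nil]
    set G := (List.range t).foldl (fun r' k' => expStep3 lena r' i (k'+1)) g with hG
    have hsh1 : pvShape (M+2) (N+2) (expStep3 lena G i (t+1)) :=
      pvShape_pvSt2 ⟨hlen, hrow⟩ _ _ _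
    refine ⟨hsh1, fun a b => ?_⟩
    show pvGd2 (expStep3 lena G i (t+1)) a b = _
    unfold expStep3
    rw [pvGd2_pvSt2 _ _ _ _ (by rw [hlen]; omega) (by rw [hrow i (by omega)]; omega)]
    rw [hcell a b]
    split_ifs <;> first | rfl | omega | (congr 2 <;> omega) | (congr 1 <;> omega)

theorem loop3_char (lena : List (List Int)) (M N : Nat) (hM : M = lena.length)
    (hN : N = (lena.headD []).length) :
    ∀ t, t ≤ M → ∀ g, pvShape (M+2) (N+2) g →
      pvShape (M+2) (N+2) ((List.range t).foldl
        (fun r k => (List.range N).foldl (fun r' k' => expStep3 lena r' (k+1) (k'+1)) r) g) ∧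
      ∀ a b, pvGd2 ((List.range t).foldl
        (fun r k => (List.range N).foldl (fun r' k' => expStep3 lena r' (k+1) (k'+1)) r) g) a b =
        if 1 ≤ a ∧ a ≤ t ∧ 1 ≤ b ∧ b ≤ N then pvGd2 lena (a-1) (b-1)
        else pvGd2 g a b := by
  intro t
  induction t with
  | zero =>
    intro _ g hg
    refine ⟨hg, fun a b => ?_⟩
    simp only [List.range_zero, List.foldl_nil]
    split_ifs <;> first | omega | rfl
  | succ t ih =>
    intro ht g hg
    obtain ⟨hshG, hcellG⟩ := ih (by omega) g hg
    rw [List.range_succ, List.foldl_append, List.foldl_cons, List.foldl_nil]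
    obtain ⟨hsh2, hcell2⟩ := loop3_inner_char lena M N hM hN (t+1) (by omega) (by omega)
      N le_rfl _ hshG
    refine ⟨hsh2, fun a b => ?_⟩
    rw [hcell2 a b, hcellG a b]
    split_ifs <;> first | rfl | omega | (congr 2 <;> omega) | (congr 1 <;> omega)

theorem expan_shape (lena : List (List Int)) (hn : 0 < (lena.headD []).length) :
    pvShape (lena.length + 2) ((lena.headD []).length + 2) (expan lena) := by
  simp only [expan]
  set M := lena.length with hM
  set N := (lena.headD []).length with hN
  have h1c := loop1_char lena M N hM hN hn M le_rfl _ (pvShape_replicate (M+2) (N+2))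
  have h2c := loop2_char lena M N hM hN hn N le_rfl _ h1c.1
  have s3 := pvShape_pvSt2 (pvShape_pvSt2 (pvShape_pvSt2 (pvShape_pvSt2 h2c.1
    0 0 (pvGd2 lena 0 0)) 0 (N+1) (pvGd2 lena 0 (N-1))) (M+1) 0 (pvGd2 lena (M-1) 0))
    (M+1) (N+1) (pvGd2 lena (M-1) (N-1))
  exact (loop3_char lena M N hM hN M le_rfl _ s3).1

theorem expan_char (lena : List (List Int)) (h1 : lena ≠ [])
    (hn : 0 < (lena.headD []).length) (a b : Nat)
    (ha : a ≤ lena.length + 1) (hb : b ≤ (lena.headD []).length + 1) :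
    pvGd2 (expan lena) a b = pvE lena a b := by
  simp only [expan]
  set M := lena.length with hM
  set N := (lena.headD []).length with hN
  have hM1 : 1 ≤ M := by rw [hM]; exact List.length_pos_iff.mpr h1
  set g0 := List.replicate (M+2) (List.replicate (N+2) (0:Int)) with hg0
  have h1c := loop1_char lena M N hM hN hn M le_rfl g0 (pvShape_replicate (M+2) (N+2))
  set g1 := (List.range M).foldl (expStep1 lena N) g0 with hg1
  have h2c := loop2_char lena M N hM hN hn N le_rfl g1 h1c.1
  set g2 := (List.range N).foldl (expStep2 lena M) g1 with hg2
  set g3 := pvSt2 g2 0 0 (pvGd2 lena 0 0) with hg3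
  have s3 : pvShape (M+2) (N+2) g3 := pvShape_pvSt2 h2c.1 _ _ _
  set g4 := pvSt2 g3 0 (N+1) (pvGd2 lena 0 (N-1)) with hg4
  have s4 : pvShape (M+2) (N+2) g4 := pvShape_pvSt2 s3 _ _ _
  set g5 := pvSt2 g4 (M+1) 0 (pvGd2 lena (M-1) 0) with hg5
  have s5 : pvShape (M+2) (N+2) g5 := pvShape_pvSt2 s4 _ _ _
  set g6 := pvSt2 g5 (M+1) (N+1) (pvGd2 lena (M-1) (N-1)) with hg6
  have s6 : pvShape (M+2) (N+2) g6 := pvShape_pvSt2 s5 _ _ _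
  have h3c := loop3_char lena M N hM hN M le_rfl g6 s6
  rw [h3c.2 a b]
  rw [hg6, pvGd2_pvSt2 g5 _ _ _ (by rw [s5.1]; omega) (by rw [s5.2 (M+1) (by omega)]; omega)]
  rw [hg5, pvGd2_pvSt2 g4 _ _ _ (by rw [s4.1]; omega) (by rw [s4.2 (M+1) (by omega)]; omega)]
  rw [hg4, pvGd2_pvSt2 g3 _ _ _ (by rw [s3.1]; omega) (by rw [s3.2 0 (by omega)]; omega)]
  rw [hg3, pvGd2_pvSt2 g2 _ _ _ (by rw [h2c.1.1]; omega) (by rw [h2c.1.2 0 (by omega)]; omega)]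
  rw [h2c.2 a b, h1c.2 a b, pvGd2_replicate]
  simp only [pvE, ← hM, ← hN, Nat.min_def]
  split_ifs <;> first | omega | (exact pvGd2_congr lena (by omega) (by omega))

theorem inner_char (L : List (List Int)) (M N i : Nat) (hi : i < M)
    (r0 : List (List Int)) (h0 : pvShape M N r0) :
    ∀ t, t ≤ N - 1 →
      ((List.range t).foldl (bfStep L i) (pvW L i 0, r0)).1 = pvW L i t ∧
      pvShape M N ((List.range t).foldl (bfStep L i) (pvW L i 0, r0)).2 ∧
      ∀ a b, pvGd2 ((List.range t).foldl (bfStep L i) (pvW L i 0, r0)).2 a b =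
        if a = i ∧ 1 ≤ b ∧ b ≤ t then PySem.Int.floordiv (pvW L i b) 9
        else pvGd2 r0 a b := by
  intro t
  induction t with
  | zero =>
    refine fun _ => ⟨rfl, h0, fun a b => ?_⟩
    simp only [List.range_zero, List.foldl_nil]
    split_ifs <;> first | omega | rfl
  | succ t ih =>
    intro ht
    obtain ⟨htm, hsh, hcell⟩ := ih (by omega)
    rw [List.range_succ, List.foldl_append, List.foldl_cons, List.foldl_nil]
    generalize hP : (List.range t).foldl (bfStep L i) (pvW L i 0, r0) = P at htm hsh hcell ⊢
    obtain ⟨tm, R⟩ := P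
    simp only at htm hsh hcell
    simp only [bfStep]
    have hfst : tm - (pvGd2 L i (t+1-1) + pvGd2 L (i+1) (t+1-1) + pvGd2 L (i+2) (t+1-1))
        + (pvGd2 L i (t+1+2) + pvGd2 L (i+1) (t+1+2) + pvGd2 L (i+2) (t+1+2))
        = pvW L i (t+1) := by
      rw [htm]; simp only [pvW, Nat.add_sub_cancel]; ring_nf
    refine ⟨hfst, pvShape_pvSt2 hsh _ _ _, fun a b => ?_⟩
    rw [pvGd2_pvSt2 R i (t+1) _ (by rw [hsh.1]; exact hi) (by rw [hsh.2 i hi]; omega) a b]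
    rw [hcell a b, hfst]
    split_ifs <;> first | rfl | omega | (exact pvFd_congr L (by omega) (by omega))

set_option maxHeartbeats 1000000 in
theorem outer_char (L : List (List Int)) (M N : Nat) (hN : 0 < N) :
    ∀ t, t ≤ M → ∀ g, pvShape M N g →
      pvShape M N ((List.range t).foldl (bfRow L N) g) ∧
      ∀ a b, pvGd2 ((List.range t).foldl (bfRow L N) g) a b =
        if a < t ∧ b < N then PySem.Int.floordiv (pvW L a b) 9
        else pvGd2 g a b := by
  intro t
  induction t with
  | zero =>
    intro _ g hg
    refine ⟨hg, fun a b => ?_⟩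
    simp only [List.range_zero, List.foldl_nil]
    split_ifs <;> first | omega | rfl
  | succ t ih =>
    intro ht g hg
    obtain ⟨hshG, hcellG⟩ := ih (by omega) g hg
    rw [List.range_succ, List.foldl_append, List.foldl_cons, List.foldl_nil]
    set G := (List.range t).foldl (bfRow L N) g with hG
    have hW0 : pvGd2 L t 0 + pvGd2 L (t+1) 0 + pvGd2 L (t+2) 0
         + pvGd2 L t 1 + pvGd2 L (t+1) 1 + pvGd2 L (t+2) 1
         + pvGd2 L t 2 + pvGd2 L (t+1) 2 + pvGd2 L (t+2) 2 = pvW L t 0 := by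
      simp [pvW]
    have hr0 : pvShape M N (pvSt2 G t 0 (PySem.Int.floordiv (pvW L t 0) 9)) :=
      pvShape_pvSt2 hshG _ _ _
    obtain ⟨hfst, hsh, hcell⟩ := inner_char L M N t (by omega) _ hr0 (N-1) le_rfl
    simp only [bfRow, hW0]
    refine ⟨hsh, fun a b => ?_⟩
    rw [hcell a b]
    rw [pvGd2_pvSt2 G t 0 (PySem.Int.floordiv (pvW L t 0) 9)
      (by rw [hshG.1]; omega) (by rw [hshG.2 t (by omega)]; omega) a b]
    rw [hcellG a b]
    split_ifs <;> first | rfl | omega | (exact pvFd_congr L (by omega) (by omega)) | (exact pvGd2_congr L (by omega) (by omega))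

theorem getElem_map_range {α : Type} (f : Nat → α) (M a : Nat)
    (h : a < ((List.range M).map f).length) : ((List.range M).map f)[a] = f a := by
  rw [List.getElem_map, List.getElem_range]

theorem gdl_eq (l : List (List Int)) (i : Nat) (h : i < l.length) : l.getD i [] = l[i] := by
  rw [List.getD_eq_getElem?_getD, List.getElem?_eq_getElem h]; rfl

theorem gdi_eq (l : List Int) (i : Nat) (h : i < l.length) : l.getD i 0 = l[i] := by
  rw [List.getD_eq_getElem?_getD, List.getElem?_eq_getElem h]; rfl

theorem eq_of_shape_cells (x y : List (List Int)) (M N : Nat)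
    (hx : pvShape M N x) (hy : pvShape M N y)
    (h : ∀ a b, a < M → b < N → pvGd2 x a b = pvGd2 y a b) : x = y := by
  apply List.ext_getElem (hx.1.trans hy.1.symm)
  intro a ha ha'
  have haM : a < M := hx.1 ▸ ha
  apply List.ext_getElem
  · rw [← gdl_eq x a ha, ← gdl_eq y a ha', hx.2 a haM, hy.2 a haM]
  intro b hb hb'
  have hbN : b < N := by rw [← gdl_eq x a ha, hx.2 a haM] at hb; exact hb
  have := h a b haM hbN
  rwa [pvGd2, pvGd2, gdl_eq x a ha, gdl_eq y a ha',
    gdi_eq _ b hb, gdi_eq _ b hb'] at this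

theorem pvAt_eq (lena : List (List Int)) (h1 : lena ≠ [])
    (hn : 0 < (lena.headD []).length)
    (a b u v : Nat) (d e : Int) (hd : d = (u : Int) - 1) (he : e = (v : Int) - 1)
    (hu : u ≤ 2) (hv : v ≤ 2) (ha : a < lena.length) (hb : b < (lena.headD []).length) :
    pvAt lena lena.length (lena.headD []).length ((a : Int) + d) ((b : Int) + e) =
      pvE lena (a+u) (b+v) := by
  subst hd he
  have hM1 : 1 ≤ lena.length := List.length_pos_iff.mpr h1
  have c1 : pvClamp ((a : Int) + ((u : Int) - 1)) ((lena.length : Int) - 1)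
      = ((min (a+u-1) (lena.length - 1) : Nat) : Int) := by
    unfold pvClamp; split_ifs <;> omega
  have c2 : pvClamp ((b : Int) + ((v : Int) - 1)) (((lena.headD []).length : Int) - 1)
      = ((min (b+v-1) ((lena.headD []).length - 1) : Nat) : Int) := by
    unfold pvClamp; split_ifs <;> omega
  unfold pvAt
  rw [c1, PySem.List.pyGetD_natCast, c2, PySem.List.pyGetD_natCast]
  rfl

-- ===== VERDICT (by name: the statement is the Claim_ definition above) =====
set_option maxHeartbeats 4000000 in
theorem box_filter3_spec : Claim_equal_box_filter3 := by
  intro lena _ hpre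
  obtain ⟨h1, hn, hrect⟩ := hpre
  have hM1 : 1 ≤ lena.length := List.length_pos_iff.mpr h1
  show box_filter3 lena = box_filter3_alt lena
  have hE := expan_char lena h1 hn
  have hEsh := expan_shape lena hn
  have hA := outer_char (expan lena) lena.length (lena.headD []).length hn
      lena.length le_rfl
      (List.replicate lena.length (List.replicate (lena.headD []).length 0))
      (pvShape_replicate _ _)
  have hAdef : box_filter3 lena = (List.range lena.length).foldl
      (bfRow (expan lena) (lena.headD []).length)
      (List.replicate lena.length (List.replicate (lena.headD []).length 0)) := rfl
  have hBdef : box_filter3_alt lena = (List.range lena.length).map (fun (i : Nat) =>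
      (List.range (lena.headD []).length).map (fun (j : Nat) =>
        PySem.Int.floordiv (([(-1:Int),0,1].map (fun di => ([(-1:Int),0,1].map (fun dj =>
          pvAt lena lena.length (lena.headD []).length ((i:Int)+di) ((j:Int)+dj))).sum)).sum) 9)) := rfl
  rw [hAdef, hBdef]
  have hBsh : pvShape lena.length (lena.headD []).length ((List.range lena.length).map (fun (i : Nat) =>
      (List.range (lena.headD []).length).map (fun (j : Nat) =>
        PySem.Int.floordiv (([(-1:Int),0,1].map (fun di => ([(-1:Int),0,1].map (fun dj =>
          pvAt lena lena.length (lena.headD []).length ((i:Int)+di) ((j:Int)+dj))).sum)).sum) 9))) := by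
    refine ⟨by simp, fun a haM => ?_⟩
    rw [gdl_eq _ a (by simpa using haM)]
    simp
  apply eq_of_shape_cells _ _ lena.length (lena.headD []).length hA.1 hBsh
  intro a b haM hbN
  rw [hA.2 a b, if_pos ⟨haM, hbN⟩]
  rw [pvGd2, gdl_eq _ a (by simpa using haM)]
  rw [getElem_map_range _ _ a (by simpa using haM)]
  rw [gdi_eq _ b (by simpa using hbN)]
  rw [getElem_map_range _ _ b (by simpa using hbN)]
  simp only [List.map_cons, List.map_nil, List.sum_cons, List.sum_nil]
  rw [pvAt_eq lena h1 hn a b 0 0 (-1) (-1) (by norm_num) (by norm_num) (by omega) (by omega) haM hbN,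
      pvAt_eq lena h1 hn a b 0 1 (-1) 0 (by norm_num) (by norm_num) (by omega) (by omega) haM hbN,
      pvAt_eq lena h1 hn a b 0 2 (-1) 1 (by norm_num) (by norm_num) (by omega) (by omega) haM hbN,
      pvAt_eq lena h1 hn a b 1 0 0 (-1) (by norm_num) (by norm_num) (by omega) (by omega) haM hbN,
      pvAt_eq lena h1 hn a b 1 1 0 0 (by norm_num) (by norm_num) (by omega) (by omega) haM hbN,
      pvAt_eq lena h1 hn a b 1 2 0 1 (by norm_num) (by norm_num) (by omega) (by omega) haM hbN,
      pvAt_eq lena h1 hn a b 2 0 1 (-1) (by norm_num) (by norm_num) (by omega) (by omega) haM hbN,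
      pvAt_eq lena h1 hn a b 2 1 1 0 (by norm_num) (by norm_num) (by omega) (by omega) haM hbN,
      pvAt_eq lena h1 hn a b 2 2 1 1 (by norm_num) (by norm_num) (by omega) (by omega) haM hbN]
  apply congrArg (fun z => PySem.Int.floordiv z 9)
  rw [pvW, hE a b (by omega) (by omega),
      hE (a+1) b (by omega) (by omega),
      hE (a+2) b (by omega) (by omega),
      hE a (b+1) (by omega) (by omega),
      hE (a+1) (b+1) (by omega) (by omega),
      hE (a+2) (b+1) (by omega) (by omega),
      hE a (b+2) (by omega) (by omega),
      hE (a+1) (b+2) (by omega) (by omega),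
      hE (a+2) (b+2) (by omega) (by omega)]
  simp only [Nat.add_zero]
  ring
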